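-- pv_equiv track=rewrite | github.com/ldeng-ustc/GTP-Wrapper | gtp_wrapper/board.py | ext_gtp_str
-- ===== SOURCE A (Python) =====
-- def gtp_chr(x: int) -> str:
--     """Convert a GTP format ordinal to its letter.
--
--     >>> gtp_chr(0)
--     'A'
--     >>> gtp_chr(24)
--     'Z'
--
--     """
--     assert 0 <= x < 26
--     if x >= ord('I') - ord('A'):
--         x += 1
--     return chr(x + ord('A'))
--
-- def ext_gtp_str(x: int) -> str:
--     """Convert board column index to extend GTP format string.
--
--     Args:
--         x (int): Board column index, starting from 0.
--
--     Returns: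
--         str: Extended GTP format string, which only contains uppercase letters from A to Z, excluding I.
--
--     >>> ext_gtp_str(0)
--     'A'
--     >>> ext_gtp_str(24)
--     'Z'
--     >>> ext_gtp_str(25)
--     'AA'
--     >>> ext_gtp_str(650)
--     'AAA'
--     """
--
--     assert x >= 0
--     x = x + 1
--     letters = []
--     while x > 0:
--         x, r = divmod(x, 25)
--         # check for exact division and borrow if needed
--         if r == 0:
--             r = 25
--             x -= 1
--         letters.append(gtp_chr(r - 1))
--     return ''.join(reversed(letters))
-- ===== SOURCE B (Python) =====
-- def ext_gtp_str(x: int) -> str: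
--     """Convert board column index to extended GTP column string (A..Z skipping I)."""
--     assert x >= 0
--     alphabet = "ABCDEFGHJKLMNOPQRSTUVWXYZ"
--     n = x + 1
--     # find the number of letters: subtract block sizes 25, 25^2, ... while they fit
--     length = 1
--     block = 25
--     while n > block:
--         n -= block
--         block *= 25
--         length += 1
--     # n - 1 is now a plain base-25 number with exactly `length` digits (leading zeros allowed)
--     r = n - 1
--     p = block // 25  # 25^(length-1)
--     s = ""
--     for _ in range(length):
--         s += alphabet[r // p]
--         r %= p
--         p //= 25
--     return s
-- ===== Notes on version B (the rewrite author's own statement) =====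
-- stated objective: alternative
-- what changed: B first finds the output length by subtracting successive block sizes (one per letter count), then emits the letters most-significant-first by division/modulo with descending powers of the alphabet size indexed into an I-free alphabet string, with no borrow step and no reversal, unlike A's little-endian divmod-with-borrow loop.
import Mathlib
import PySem

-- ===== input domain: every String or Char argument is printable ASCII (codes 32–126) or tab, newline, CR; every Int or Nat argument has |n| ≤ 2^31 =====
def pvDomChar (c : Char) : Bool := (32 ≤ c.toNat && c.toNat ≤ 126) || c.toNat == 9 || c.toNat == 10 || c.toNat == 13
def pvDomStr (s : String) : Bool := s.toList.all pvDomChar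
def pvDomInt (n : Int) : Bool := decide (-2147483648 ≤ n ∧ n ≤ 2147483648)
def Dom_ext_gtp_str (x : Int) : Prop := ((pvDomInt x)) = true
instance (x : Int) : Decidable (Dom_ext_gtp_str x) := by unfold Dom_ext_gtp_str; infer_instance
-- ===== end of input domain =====

-- B computes the output length first and then emits the letters most-significant-first
-- (no borrow step, no reversal); equal-cost alternative to A's little-endian borrow loop.

-- ===== PORT A =====
-- gtp_chr without its assert (every call site below passes 0 ≤ x < 26); ord('I') - ord('A') = 8
def gtpChr (x : Int) : Char :=
  let x := if 8 ≤ x then x + 1 else x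
  Char.ofNat (x + 65).toNat

-- the `while x > 0` loop of A, accumulating `letters`
def extLoopA (x : Int) (letters : List Char) : List Char :=
  if _h : 0 < x then
    let q := PySem.Int.floordiv x 25
    let r := PySem.Int.mod x 25
    if r = 0 then extLoopA (q - 1) (letters ++ [gtpChr (25 - 1)])
    else extLoopA q (letters ++ [gtpChr (r - 1)])
  else letters
termination_by x.toNat
decreasing_by
  all_goals simp only [PySem.Int.floordiv_eq_ediv_of_pos (by norm_num : (0:Int) < 25)]
  all_goals omega

def ext_gtp_str (x : Int) : String := String.mk ((extLoopA (x + 1) []).reverse)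

-- ===== PORT B =====
def gtpAlphabet : List Char := "ABCDEFGHJKLMNOPQRSTUVWXYZ".toList

-- the `while n > block` loop of B; all values are nonnegative under Pre_, so Nat is exact.
-- `fuel` only makes the recursion structural (fuel = n suffices: n drops by block ≥ 1 each turn).
def blockLoopB : Nat → Nat → Nat → Nat → Nat × Nat × Nat
  | 0, n, block, len => (n, block, len)
  | fuel + 1, n, block, len =>
      if block < n then blockLoopB fuel (n - block) (block * 25) (len + 1)
      else (n, block, len)

-- the `for _ in range(length)` loop of B; index always in range, so getD is exact here
def digitLoopB (alphabet : List Char) : Nat → Nat → Nat → List Char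
  | 0, _, _ => []
  | len + 1, r, p => alphabet.getD (r / p) 'A' :: digitLoopB alphabet len (r % p) (p / 25)

def ext_gtp_str_alt (x : Int) : String :=
  let n : Nat := (x + 1).toNat     -- x ≥ 0 under Pre_, so this is exactly Python's x + 1
  match blockLoopB n n 25 1 with
  | (n', block, len) => String.mk (digitLoopB gtpAlphabet len (n' - 1) (block / 25))

-- ===== PRECONDITION & SPEC =====
-- A (and B) raise AssertionError for x < 0; excluded.
def Pre_ext_gtp_str (x : Int) : Prop := 0 ≤ x
instance (x : Int) : Decidable (Pre_ext_gtp_str x) := by unfold Pre_ext_gtp_str; infer_instance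
def pvWitness_ext_gtp_str : Int := (0)
def Spec_ext_gtp_str (x : Int) (out : String) : Prop := out = ext_gtp_str_alt x
instance (x : Int) (out : String) : Decidable (Spec_ext_gtp_str x out) := by unfold Spec_ext_gtp_str; infer_instance

-- ===== CLAIM (what is proved, stated in full; the proofs are below) =====
def Claim_equal_ext_gtp_str : Prop := ∀ (x : Int), Dom_ext_gtp_str x → Pre_ext_gtp_str x → Spec_ext_gtp_str x (ext_gtp_str x)

-- ===== LEMMAS AND PROOFS =====

-- little-endian bijective base-25 digit model (each digit in 1..25) shared by both proofs
def digitsA (n : Nat) : List Nat :=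
  if _h : 0 < n then
    if n % 25 = 0 then 25 :: digitsA (n / 25 - 1) else n % 25 :: digitsA (n / 25)
  else []
decreasing_by all_goals omega

def gFun (d : Nat) : Char := gtpChr ((d : Int) - 1)

lemma digitsA_zero : digitsA 0 = [] := by rw [digitsA]; simp

lemma digitsA_pos {n : Nat} (h : 0 < n) :
    digitsA n = if n % 25 = 0 then 25 :: digitsA (n / 25 - 1) else n % 25 :: digitsA (n / 25) := by
  rw [digitsA]; simp [h]

-- A's loop computes the mapped digit list (little-endian), appended to the accumulator
lemma extLoopA_eq (n : Nat) : ∀ acc : List Char,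
    extLoopA (n : Int) acc = acc ++ (digitsA n).map gFun := by
  induction n using Nat.strong_induction_on with
  | _ n ih =>
    intro acc
    by_cases h : 0 < n
    · have hpos : (0:Int) < (n:Int) := by exact_mod_cast h
      rw [extLoopA, dif_pos hpos]
      rw [show (25:Int) = ((25:Nat):Int) by norm_num]
      simp only [PySem.Int.floordiv_natCast, PySem.Int.mod_natCast]
      rw [show ((25:Nat):Int) = (25:Int) by norm_num]
      rw [digitsA_pos h]
      by_cases hr : n % 25 = 0
      · have hq : 1 ≤ n / 25 := by omega
        have hcast : ((n / 25 : Nat) : Int) - 1 = ((n / 25 - 1 : Nat) : Int) := by omega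
        rw [if_pos (by exact_mod_cast hr : ((n % 25 : Nat) : Int) = 0), if_pos hr]
        rw [hcast, ih (n / 25 - 1) (by omega)]
        simp [gFun, List.append_assoc]
      · rw [if_neg (by exact_mod_cast hr : ¬ ((n % 25 : Nat) : Int) = 0), if_neg hr]
        rw [ih (n / 25) (by omega)]
        simp [gFun, List.append_assoc]
    · have hn : n = 0 := by omega
      subst hn
      rw [extLoopA]
      simp [digitsA]

-- ---- B-side loop characterisations ----

-- fuel irrelevance: any fuel ≥ n gives the same result (n drops by block ≥ 1 each turn)
lemma blockLoopB_fuel : ∀ f₁ : Nat, ∀ f₂ n block len : Nat, n ≤ f₁ → n ≤ f₂ → 1 ≤ block →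
    blockLoopB f₁ n block len = blockLoopB f₂ n block len := by
  intro f₁
  induction f₁ with
  | zero =>
    intro f₂ n block len h1 h2 hb
    have : n = 0 := by omega
    subst this
    cases f₂ with
    | zero => rfl
    | succ f => simp [blockLoopB]
  | succ f ihf =>
    intro f₂ n block len h1 h2 hb
    cases f₂ with
    | zero =>
      have : n = 0 := by omega
      subst this
      simp [blockLoopB]
    | succ f' =>
      simp only [blockLoopB]
      by_cases hg : block < n
      · rw [if_pos hg, if_pos hg]
        exact ihf f' (n - block) (block * 25) (len + 1) (by omega) (by omega) (by omega)
      · rw [if_neg hg, if_neg hg]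

-- invariant: the loop returns (n', block·25^k, len+k) with 1 ≤ n' ≤ block·25^k
lemma blockLoopB_inv : ∀ f n block len : Nat, 1 ≤ n → n ≤ f → 1 ≤ block →
    ∃ n' k, blockLoopB f n block len = (n', block * 25 ^ k, len + k) ∧
      1 ≤ n' ∧ n' ≤ block * 25 ^ k := by
  intro f
  induction f with
  | zero => intro n block len h1 h2 _; omega
  | succ f ihf =>
    intro n block len h1 h2 hb
    simp only [blockLoopB]
    by_cases hg : block < n
    · rw [if_pos hg]
      obtain ⟨n', k, heq, hn1, hn2⟩ :=
        ihf (n - block) (block * 25) (len + 1) (by omega) (by omega) (by omega)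
      refine ⟨n', k + 1, ?_, hn1, ?_⟩
      · rw [heq]
        have hbk : block * 25 * 25 ^ k = block * 25 ^ (k + 1) := by ring
        have hlen : len + 1 + k = len + (k + 1) := by omega
        rw [hbk, hlen]
      · calc n' ≤ block * 25 * 25 ^ k := hn2
          _ = block * 25 ^ (k + 1) := by ring
    · rw [if_neg hg]
      exact ⟨n, 0, by simp, h1, by simpa using (by omega : n ≤ block)⟩

-- parallel-run lemma: the block loop on 25*q + d - 25 mirrors the loop on q one level down
lemma blockLoopB_par : ∀ f q block len d : Nat, 1 ≤ d → d ≤ 25 →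
    blockLoopB f (25 * q + d - 25) (block * 25) (len + 1) =
      (fun t => (25 * t.1 + d - 25, t.2.1 * 25, t.2.2 + 1)) (blockLoopB f q block len) := by
  intro f
  induction f with
  | zero => intro q block len d _ _; rfl
  | succ f ihf =>
    intro q block len d hd1 hd2
    simp only [blockLoopB]
    by_cases hg : block < q
    · rw [if_pos (by omega : block * 25 < 25 * q + d - 25), if_pos hg]
      have harg : 25 * q + d - 25 - block * 25 = 25 * (q - block) + d - 25 := by
        have : 25 * q = 25 * (q - block) + 25 * block := by omega
        omega
      rw [harg]
      have := ihf (q - block) (block * 25) (len + 1) d hd1 hd2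
      simpa using this
    · rw [if_neg (by omega : ¬ (block * 25 < 25 * q + d - 25)), if_neg hg]

lemma digitLoopB_succ (a : List Char) (len r p : Nat) :
    digitLoopB a (len + 1) r p = a.getD (r / p) 'A' :: digitLoopB a len (r % p) (p / 25) := rfl

-- MSB digit-extraction lemma: peeling the last base-25 digit
lemma digitLoopB_last : ∀ l r d : Nat, d < 25 → r < 25 ^ l →
    digitLoopB gtpAlphabet (l + 1) (25 * r + d) (25 ^ l) =
      digitLoopB gtpAlphabet l r (25 ^ l / 25) ++ [gtpAlphabet.getD d 'A'] := by
  intro l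
  induction l with
  | zero =>
    intro r d _ hr
    have : r = 0 := by omega
    subst this
    simp [digitLoopB, Nat.div_one]
  | succ l ihl =>
    intro r d hd hr
    have hm : 0 < 25 ^ l := pow_pos (by norm_num : (0:ℕ) < 25) l
    have hrm : r % 25 ^ l < 25 ^ l := Nat.mod_lt _ hm
    have hkey : 25 * r + d = (25 * (r % 25 ^ l) + d) + (r / 25 ^ l) * 25 ^ (l + 1) := by
      conv_lhs => rw [← Nat.div_add_mod r (25 ^ l)]
      rw [pow_succ]; ring
    have hlt : 25 * (r % 25 ^ l) + d < 25 ^ (l + 1) := by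
      rw [pow_succ]; nlinarith
    have hpos : 0 < 25 ^ (l + 1) := pow_pos (by norm_num : (0:ℕ) < 25) _
    have hdiv : (25 * r + d) / 25 ^ (l + 1) = r / 25 ^ l := by
      rw [hkey, Nat.add_mul_div_right _ _ hpos, Nat.div_eq_of_lt hlt, Nat.zero_add]
    have hmod : (25 * r + d) % 25 ^ (l + 1) = 25 * (r % 25 ^ l) + d := by
      rw [hkey, Nat.add_mul_mod_self_right, Nat.mod_eq_of_lt hlt]
    have hp : 25 ^ (l + 1) / 25 = 25 ^ l := by
      rw [pow_succ, Nat.mul_div_cancel _ (by norm_num : 0 < 25)]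
    rw [digitLoopB_succ, hdiv, hmod, hp]
    rw [ihl (r % 25 ^ l) d hd hrm]
    simp [digitLoopB_succ]

-- the body of B as a function of n = x + 1
def bresB (n : Nat) : List Char :=
  match blockLoopB n n 25 1 with
  | (n', block, len) => digitLoopB gtpAlphabet len (n' - 1) (block / 25)

lemma alt_eq_bresB (x : Int) : ext_gtp_str_alt x = String.mk (bresB (x + 1).toNat) := rfl

-- base case: a single letter
lemma bresB_base (d : Nat) (h1 : 1 ≤ d) (h2 : d ≤ 25) :
    bresB d = [gtpAlphabet.getD (d - 1) 'A'] := by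
  unfold bresB
  obtain ⟨f, rfl⟩ : ∃ f, d = f + 1 := ⟨d - 1, by omega⟩
  simp only [blockLoopB, if_neg (by omega : ¬ (25 < f + 1))]
  simp [digitLoopB]

-- composition: bresB (25q + d) = bresB q ++ [letter d] for q ≥ 1
lemma bresB_step (q d : Nat) (hq : 1 ≤ q) (hd1 : 1 ≤ d) (hd2 : d ≤ 25) :
    bresB (25 * q + d) = bresB q ++ [gtpAlphabet.getD (d - 1) 'A'] := by
  unfold bresB
  set n := 25 * q + d with hn
  obtain ⟨f, hf⟩ : ∃ f, n = f + 1 := ⟨n - 1, by omega⟩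
  obtain ⟨q', k, hq_eq, hq1, hq2⟩ := blockLoopB_inv q q 25 1 hq (le_refl q) (by omega)
  have hfq : blockLoopB f q 25 1 = (q', 25 * 25 ^ k, 1 + k) := by
    rw [blockLoopB_fuel f q q 25 1 (by omega) (le_refl q) (by omega), hq_eq]
  have hstep : blockLoopB n n 25 1 = blockLoopB f (n - 25) (25 * 25) (1 + 1) := by
    conv_lhs => rw [hf]
    simp only [blockLoopB]
    rw [if_pos (by omega : 25 < f + 1)]
    congr 1
    omega
  have harg : n - 25 = 25 * q + d - 25 := by omega
  have hpar := blockLoopB_par f q 25 1 d hd1 hd2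
  rw [hstep, harg, hpar, hfq]
  simp only []
  -- now the digit loops
  have hq'1 : (25 * q' + d - 25) - 1 = 25 * (q' - 1) + (d - 1) := by omega
  have hb : 25 * 25 ^ k * 25 / 25 = 25 ^ (k + 1) := by
    rw [Nat.mul_div_cancel _ (by norm_num : 0 < 25), pow_succ]; ring
  have hb2 : 25 * 25 ^ k / 25 = 25 ^ k := by
    rw [Nat.mul_comm, Nat.mul_div_cancel _ (by norm_num : 0 < 25)]
  have hlast := digitLoopB_last (k + 1) (q' - 1) (d - 1) (by omega)
    (by rw [pow_succ]; omega)
  have hcount : 1 + k + 1 = (k + 1) + 1 := by omega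
  rw [hq_eq]
  simp only []
  rw [hq'1, hb, hcount, hlast, hb2]
  have hb3 : 25 ^ (k + 1) / 25 = 25 ^ k := by
    rw [pow_succ, Nat.mul_div_cancel _ (by norm_num : 0 < 25)]
  have h1k : 1 + k = k + 1 := by omega
  rw [hb3, h1k]

-- the 25 letters: table lookup agrees with gtp_chr
lemma alphabet_eq_gtpChr (d : Nat) (h1 : 1 ≤ d) (h2 : d ≤ 25) :
    gtpAlphabet.getD (d - 1) 'A' = gFun d := by
  interval_cases d <;> decide

-- main: B's body equals the reversed mapped digit list
lemma bresB_eq (n : Nat) :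
    1 ≤ n → bresB n = ((digitsA n).map gFun).reverse := by
  induction n using Nat.strong_induction_on with
  | _ n ih =>
    intro h
    rw [digitsA_pos h]
    by_cases hr : n % 25 = 0
    · have hq : 1 ≤ n / 25 := by omega
      have hn : n = 25 * (n / 25 - 1) + 25 := by omega
      by_cases hq1 : n / 25 - 1 = 0
      · rw [if_pos hr]
        have hn25 : n = 25 := by omega
        subst hn25
        rw [show (25:Nat)/25 - 1 = 0 from rfl, digitsA_zero]
        rw [bresB_base 25 (by omega) (by omega), alphabet_eq_gtpChr 25 (by omega) (by omega)]
        simp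
      · rw [if_pos hr]
        conv_lhs => rw [hn]
        rw [bresB_step (n / 25 - 1) 25 (by omega) (by omega) (by omega)]
        rw [ih (n / 25 - 1) (by omega) (by omega)]
        rw [alphabet_eq_gtpChr 25 (by omega) (by omega)]
        simp
    · rw [if_neg hr]
      have hd1 : 1 ≤ n % 25 := by omega
      have hd2 : n % 25 ≤ 25 := by omega
      by_cases hq1 : n / 25 = 0
      · have hnd : n = n % 25 := by omega
        conv_lhs => rw [hnd]
        rw [bresB_base (n % 25) hd1 hd2, alphabet_eq_gtpChr _ hd1 hd2]
        rw [hq1, digitsA_zero]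
        simp
      · have hn : n = 25 * (n / 25) + n % 25 := by omega
        conv_lhs => rw [hn]
        rw [bresB_step (n / 25) (n % 25) (by omega) hd1 hd2]
        rw [ih (n / 25) (by omega) (by omega)]
        rw [alphabet_eq_gtpChr _ hd1 hd2]
        simp

-- ===== VERDICT (by name: the statement is the Claim_ definition above) =====
theorem ext_gtp_str_spec : Claim_equal_ext_gtp_str := by
  intro x _hdom hpre
  unfold Spec_ext_gtp_str
  have hx : (x + 1 : Int) = (((x + 1).toNat : Nat) : Int) := by
    unfold Pre_ext_gtp_str at hpre; omega
  rw [ext_gtp_str, alt_eq_bresB, hx, extLoopA_eq]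
  rw [bresB_eq _ (by unfold Pre_ext_gtp_str at hpre; omega)]
  simp
  rw [show (max (x + 1) 0).toNat = (x + 1).toNat by omega]
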